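-- pv_equiv track=rewrite | github.com/AndreiZherder/leetcode | 2584-split-the-array-to-make-coprime-products.py | findValidSplit
-- ===== SOURCE A (Python) =====
-- from collections import Counter
-- from typing import List
--
-- def prime_factors(n: int):
--     """
--     Prime factors of n
--     prime_factors(99) --> 3 3 11
--     """
--     while n % 2 == 0:
--         yield 2
--         n //= 2
--     p = 3
--     while p * p <= n:
--         quotient, reminder = divmod(n, p)
--         if reminder == 0:
--             yield p
--             n = quotient
--         else:
--             p += 2
--     if n != 1:
--         yield n
--
-- def findValidSplit(nums: List[int]) -> int:
--     n = len(nums)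
--     if n == 1:
--         return -1
--     pf = [set(prime_factors(nums[i])) for i in range(n)]
--     suf = Counter(pf[n - 1])
--     for i in range(n - 1, 0, -1):
--         for p in pf[i]:
--             suf[p] += 1
--     cur = set()
--     for i in range(n - 1):
--         cur |= pf[i]
--         if all(p not in suf for p in cur):
--             return i
--         for p in pf[i + 1]:
--             suf[p] -= 1
--             if suf[p] == 0:
--                 del suf[p]
--     return -1
-- ===== SOURCE B (Python) =====
-- def prime_factors(n: int):
--     # same factorization helper as the original module
--     while n % 2 == 0:
--         yield 2
--         n //= 2
--     p = 3
--     while p * p <= n: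
--         quotient, remainder = divmod(n, p)
--         if remainder == 0:
--             yield p
--             n = quotient
--         else:
--             p += 2
--     if n != 1:
--         yield n
--
-- def findValidSplit(nums):
--     n = len(nums)
--     pf = [list(prime_factors(x)) for x in nums]
--     last = {}
--     for i, ps in enumerate(pf):
--         for p in ps:
--             last[p] = i
--     reach = -1
--     for i in range(n - 1):
--         for p in pf[i]:
--             if last[p] > reach:
--                 reach = last[p]
--         if reach <= i:
--             return i
--     return -1
-- ===== Notes on version B (the rewrite author's own statement) =====
-- stated objective: alternative
-- what changed: B replaces A's suffix prime Counter plus a full rescan of the growing prefix prime set at every split (worst-case quadratic in the number of stored primes) by one dict of last occurrence indices built in a single pass and a forward sweep that keeps a running max 'reach'; the split is valid exactly when reach <= i.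
-- outside the precondition, e.g. on findValidSplit([0]): A returns -1, B does not finish within the time limit
import Mathlib
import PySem

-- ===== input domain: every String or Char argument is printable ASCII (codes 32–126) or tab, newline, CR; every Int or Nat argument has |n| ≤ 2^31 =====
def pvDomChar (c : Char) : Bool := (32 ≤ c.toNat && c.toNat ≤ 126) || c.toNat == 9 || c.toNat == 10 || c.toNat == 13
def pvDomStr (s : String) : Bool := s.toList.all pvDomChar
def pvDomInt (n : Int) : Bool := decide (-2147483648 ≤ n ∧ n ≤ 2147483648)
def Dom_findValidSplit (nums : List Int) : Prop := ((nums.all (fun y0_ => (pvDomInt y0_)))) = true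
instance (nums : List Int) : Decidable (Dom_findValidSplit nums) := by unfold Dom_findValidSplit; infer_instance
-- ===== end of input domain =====

-- B re-implements the split search as a single forward sweep over last-occurrence indices
-- (one dict built once) instead of A's suffix counter plus a full rescan of the growing
-- prefix prime set at every split; both share the module's prime_factors helper.

-- ===== PORT A =====

-- prime_factors, first while loop: strip factors of 2.  The `n ≠ 0` guard only makes the
-- recursion total: Python loops forever on n = 0 (excluded by Pre_).
def pvTwos (n : Int) : List Int × Int :=
  if h : PySem.Int.mod n 2 = 0 ∧ n ≠ 0 then
    let r := pvTwos (PySem.Int.floordiv n 2)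
    (2 :: r.1, r.2)
  else ([], n)
termination_by n.natAbs
decreasing_by
  have hd : (2 : Int) ∣ n := (PySem.Int.mod_eq_zero_iff_dvd n 2).mp h.1
  obtain ⟨k, hk⟩ := hd
  have he : PySem.Int.floordiv n 2 = k := by
    rw [PySem.Int.floordiv_eq_ediv_of_pos (by norm_num : (0:Int) < 2), hk]
    omega
  rw [he]
  have hn0 := h.2
  omega

-- prime_factors, second while loop: trial division by odd p.  The `3 ≤ p` guard is an
-- invariant of Python's loop (p starts at 3 and only grows); it only serves termination.
def pvTrial (n p : Int) : List Int × Int :=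
  if h : p * p ≤ n ∧ 3 ≤ p then
    let q := PySem.Int.floordiv n p
    let r := PySem.Int.mod n p
    if hr : r = 0 then
      let t := pvTrial q p
      (p :: t.1, t.2)
    else
      pvTrial n (p + 2)
  else ([], n)
termination_by (n.toNat, (n + 2 - p).toNat)
decreasing_by
  · apply Prod.Lex.left
    have hqm := PySem.Int.floordiv_mul_add_mod n p
    have hr' : PySem.Int.mod n p = 0 := hr
    rw [hr', add_zero] at hqm
    have hp3 : 3 ≤ p := h.2
    have hn9 : 9 ≤ n := by nlinarith [h.1]
    have hq1 : 1 ≤ PySem.Int.floordiv n p := by nlinarith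
    have : PySem.Int.floordiv n p < n := by nlinarith
    omega
  · apply Prod.Lex.right
    have hp3 : 3 ≤ p := h.2
    have hpn : p ≤ n := by nlinarith [h.1]
    omega

-- prime_factors(n) as the list of yielded values
def pvPrimeFactors (n : Int) : List Int :=
  let t := pvTwos n
  let s := pvTrial t.2 3
  t.1 ++ s.1 ++ (if s.2 ≠ 1 then [s.2] else [])

-- forward loop of A: `for i in range(n-1): cur |= pf[i]; if all(...): return i; ...`
def pvFwdA (pf : List (PySem.Set Int)) : List Int → PySem.Set Int → PySem.Dict Int Int → Int
  | [], _, _ => -1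
  | i :: rest, cur, suf =>
    let cur' := PySem.Set.union cur (PySem.List.pyGetD pf i [])
    if cur'.all (fun p => !(suf.contains p)) then i
    else
      let suf' := (PySem.List.pyGetD pf (i + 1) []).foldl
        (fun d p =>
          let v := d.getD p 0 - 1
          let d' := d.insert p v
          if v = 0 then d'.erase p else d') suf
      pvFwdA pf rest cur' suf'

def findValidSplit (nums : List Int) : Int :=
  let n : Int := PySem.List.len nums
  if n = 1 then -1
  else
    let pf : List (PySem.Set Int) := nums.map (fun x => PySem.Set.ofList (pvPrimeFactors x))
    match PySem.List.pyGet? pf (n - 1) with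
    | none => -1  -- unreachable under Pre_: Python's pf[n-1] raises IndexError on []
    | some lastpf =>
      let suf0 : PySem.Dict Int Int := PySem.Dict.counter lastpf
      let suf := (PySem.List.pyRange (n - 1) 0 (-1)).foldl
        (fun d i => (PySem.List.pyGetD pf i []).foldl (fun d p => d.modify p 0 (· + 1)) d) suf0
      pvFwdA pf (PySem.List.pyRange 0 (n - 1) 1) PySem.Set.empty suf

-- ===== PORT B =====

-- `for i, ps in enumerate(pf): for p in ps: last[p] = i`
def pvLastDict (pf : List (List Int)) : PySem.Dict Int Int :=
  (PySem.List.enumerate pf 0).foldl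
    (fun d ips => ips.2.foldl (fun d p => d.insert p ips.1) d) PySem.Dict.empty

-- `for i in range(n-1): for p in pf[i]: if last[p] > reach: reach = last[p]; if reach <= i: return i`
def pvFwdB (pf : List (List Int)) (last : PySem.Dict Int Int) : List Int → Int → Int
  | [], _ => -1
  | i :: rest, reach =>
    let reach' := (PySem.List.pyGetD pf i []).foldl
      (fun r p => if r < last.getD p 0 then last.getD p 0 else r) reach
    if reach' ≤ i then i else pvFwdB pf last rest reach'

def findValidSplit_alt (nums : List Int) : Int :=
  let n : Int := PySem.List.len nums
  let pf : List (List Int) := nums.map (fun x => pvPrimeFactors x)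
  let last := pvLastDict pf
  pvFwdB pf last (PySem.List.pyRange 0 (n - 1) 1) (-1)

-- ===== PRECONDITION & SPEC =====
-- Pre_ excludes the empty list (Python's pf[n-1] raises IndexError there) and lists
-- containing 0 (prime_factors(0) loops forever: `while 0 % 2 == 0`; A escapes that on the
-- single-element list [0] only through its n == 1 early return, while B factors every
-- element first and so does not finish there).
def Pre_findValidSplit (nums : List Int) : Prop := nums ≠ [] ∧ ∀ x ∈ nums, x ≠ 0
instance (nums : List Int) : Decidable (Pre_findValidSplit nums) := by unfold Pre_findValidSplit; infer_instance

def pvWitness_findValidSplit : List Int := [4, 3, 15]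

def Spec_findValidSplit (nums : List Int) (out : Int) : Prop := out = findValidSplit_alt nums
instance (nums : List Int) (out : Int) : Decidable (Spec_findValidSplit nums out) := by unfold Spec_findValidSplit; infer_instance

-- ===== CLAIM (what is proved, stated in full; the proofs are below) =====
def Claim_equal_findValidSplit : Prop := ∀ (nums : List Int), Dom_findValidSplit nums → Pre_findValidSplit nums → Spec_findValidSplit nums (findValidSplit nums)


-- ===== LEMMAS AND PROOFS =====

-- lookups after Dict.erase (no prelude lemma covers erase)
theorem pvGet?_erase {nu : Type} (d : PySem.Dict Int nu) (k q : Int) :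
    (d.erase k).get? q = if q = k then none else d.get? q := by
  rcases d with ⟨l⟩
  induction l with
  | nil => simp [PySem.Dict.erase, PySem.Dict.get?]
  | cons a t ih =>
    by_cases hak : a.1 = k <;> by_cases haq : a.1 = q <;>
      simp_all [PySem.Dict.erase, PySem.Dict.get?, List.filter_cons, List.find?_cons] <;>
      omega

-- last occurrence index of q among the lists of ls
def pvLastIdx? (q : Int) : List (List Int) → Option Nat
  | [] => none
  | l :: ls =>
    match pvLastIdx? q ls with
    | some k => some (k + 1)
    | none => if q ∈ l then some 0 else none

-- the count A's suffix Counter holds for key q at the start of forward-iteration i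
def pvC (pfs : List (PySem.Set Int)) (i : Nat) (q : Int) : Int :=
  ((pfs.drop (i + 1)).flatten.count q : Int) + ((pfs.drop (pfs.length - 1)).flatten.count q : Int)

-- the Int value B's `last` dict returns for an occurring prime
def pvLV (pfl : List (List Int)) (q : Int) : Int :=
  match pvLastIdx? q pfl with
  | some k => (k : Int)
  | none => 0

theorem pvGet?_eq_of (d : PySem.Dict Int Int) (q : Int) (c : Int)
    (h1 : d.getD q 0 = c) (h2 : d.contains q = true ↔ c ≠ 0) :
    d.get? q = if c = 0 then none else some c := by
  have hc := PySem.Dict.contains_eq_isSome_get? d q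
  have hg := PySem.Dict.getD_eq_get?_getD d q 0
  cases hq : d.get? q with
  | none =>
    rw [hq] at hc hg
    simp only [Option.isSome_none, Option.getD_none] at hc hg
    have hc0 : c = 0 := by
      by_contra hne
      have := h2.mpr hne
      rw [hc] at this
      exact Bool.false_ne_true this
    simp [hc0]
  | some w =>
    rw [hq] at hc hg
    simp only [Option.isSome_some, Option.getD_some] at hc hg
    have hne : c ≠ 0 := h2.mp hc
    rw [if_neg hne]
    rw [h1] at hg
    rw [hg]

-- decrement loop of A: `suf[p] -= 1; if suf[p] == 0: del suf[p]` over a duplicate-free list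
theorem pvDecFold (s : List Int) (hs : s.Nodup) :
    ∀ (d : PySem.Dict Int Int) (q : Int),
      (s.foldl (fun d p =>
          let v := d.getD p 0 - 1
          let d' := d.insert p v
          if v = 0 then d'.erase p else d') d).get? q
        = if q ∈ s then (if d.getD q 0 - 1 = 0 then none else some (d.getD q 0 - 1)) else d.get? q := by
  induction s with
  | nil => simp
  | cons p t ih =>
    intro d q
    obtain ⟨hp, hnd⟩ := List.nodup_cons.mp hs
    rw [List.foldl_cons, ih hnd]
    have hstep : ∀ r : Int,
        ((let v := d.getD p 0 - 1
          let d' := d.insert p v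
          if v = 0 then d'.erase p else d').get? r)
          = if r = p then (if d.getD p 0 - 1 = 0 then none else some (d.getD p 0 - 1)) else d.get? r := by
      intro r
      by_cases hv : d.getD p 0 - 1 = 0
      · simp only [hv, if_pos rfl, if_true]
        rw [pvGet?_erase]
        by_cases hr : r = p
        · simp [hr]
        · rw [if_neg hr, if_neg hr, PySem.Dict.get?_insert_of_ne d _ hr]
      · simp only [hv, if_false]
        by_cases hr : r = p
        · subst hr; rw [PySem.Dict.get?_insert_self]; simp [hv]
        · rw [PySem.Dict.get?_insert_of_ne d _ hr, if_neg hr]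
    have hgd : ∀ r : Int, r ≠ p →
        ((let v := d.getD p 0 - 1
          let d' := d.insert p v
          if v = 0 then d'.erase p else d').getD r 0) = d.getD r 0 := by
      intro r hr
      rw [PySem.Dict.getD_eq_get?_getD, hstep r, if_neg hr, ← PySem.Dict.getD_eq_get?_getD]
    by_cases hq : q ∈ t
    · have hqp : q ≠ p := fun h => hp (h ▸ hq)
      rw [if_pos hq, if_pos (List.mem_cons_of_mem _ hq), hgd q hqp]
    · rw [if_neg hq, hstep q]
      by_cases hqp : q = p
      · simp [hqp]
      · simp [hqp, hq]

-- inner loop of B's dict build: `for p in ps: last[p] = i`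
theorem pvInsFold (l : List Int) (i : Int) :
    ∀ (d : PySem.Dict Int Int) (q : Int),
      (l.foldl (fun d p => d.insert p i) d).get? q = if q ∈ l then some i else d.get? q := by
  induction l with
  | nil => simp
  | cons p t ih =>
    intro d q
    simp only [List.foldl_cons, ih, List.mem_cons]
    by_cases hqt : q ∈ t
    · simp [hqt]
    · by_cases hqp : q = p
      · simp [hqp, hqt, PySem.Dict.get?_insert_self]
      · simp [hqp, hqt, PySem.Dict.get?_insert_of_ne d i hqp]

theorem pvLastAux (ls : List (List Int)) :
    ∀ (s : Int) (d : PySem.Dict Int Int) (q : Int),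
      ((PySem.List.enumerate ls s).foldl
          (fun d ips => ips.2.foldl (fun d p => d.insert p ips.1) d) d).get? q
        = match pvLastIdx? q ls with
          | some k => some (s + (k : Int))
          | none => d.get? q := by
  induction ls with
  | nil => intro s d q; simp [PySem.List.enumerate_nil, pvLastIdx?]
  | cons l t ih =>
    intro s d q
    rw [PySem.List.enumerate_cons, List.foldl_cons, ih]
    simp only [pvLastIdx?]
    cases ht : pvLastIdx? q t with
    | some k => simp only; push_cast; ring_nf
    | none =>
      simp only [pvInsFold]
      by_cases hql : q ∈ l <;> simp [hql]

theorem pvLastDict_get? (pfl : List (List Int)) (q : Int) :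
    (pvLastDict pfl).get? q
      = match pvLastIdx? q pfl with
        | some k => some ((k : Int))
        | none => none := by
  unfold pvLastDict
  rw [pvLastAux]
  cases h : pvLastIdx? q pfl with
  | some k => simp
  | none => simp [PySem.Dict.get?_empty]

theorem pvLastIdx?_none_iff (ls : List (List Int)) (q : Int) :
    pvLastIdx? q ls = none ↔ ∀ l ∈ ls, q ∉ l := by
  induction ls with
  | nil => simp [pvLastIdx?]
  | cons l t ih =>
    simp only [pvLastIdx?, List.mem_cons]
    cases ht : pvLastIdx? q t with
    | some k =>
      simp only
      constructor
      · intro h; exact absurd h (by simp)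
      · intro h
        have := (ih.mpr (fun l' hl' => h l' (Or.inr hl')))
        rw [ht] at this; exact absurd this (by simp)
    | none =>
      by_cases hql : q ∈ l
      · simp only [hql, if_pos]
        constructor
        · intro h; exact absurd h (by simp)
        · intro h; exact absurd hql (h l (Or.inl rfl))
      · simp only [hql, if_neg (by exact fun h => hql h)]
        constructor
        · intro _ l' hl'
          rcases hl' with rfl | hl'
          · exact hql
          · exact (ih.mp ht) l' hl'
        · intro _; rfl

theorem pvLastIdx?_some_spec (ls : List (List Int)) (q : Int) (k : Nat)
    (h : pvLastIdx? q ls = some k) :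
    ∃ (hk : k < ls.length), q ∈ ls[k] ∧ ∀ j (hj : j < ls.length), k < j → q ∉ ls[j] := by
  induction ls generalizing k with
  | nil => simp [pvLastIdx?] at h
  | cons l t ih =>
    simp only [pvLastIdx?] at h
    cases ht : pvLastIdx? q t with
    | some k' =>
      rw [ht] at h
      simp only [Option.some.injEq] at h
      obtain ⟨hk', hmem, hnone⟩ := ih k' ht
      subst h
      refine ⟨by simpa using Nat.succ_lt_succ hk', by simpa using hmem, ?_⟩
      intro j hj hlt
      match j, hj with
      | j + 1, hj =>
        simpa using hnone j (by simpa using hj) (by omega)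
    | none =>
      rw [ht] at h
      by_cases hql : q ∈ l
      · rw [if_pos hql] at h
        simp only [Option.some.injEq] at h
        subst h
        refine ⟨by simp, by simpa using hql, ?_⟩
        intro j hj hlt
        match j, hj with
        | j + 1, hj =>
          have hjt : j < t.length := by simpa using hj
          simpa using (pvLastIdx?_none_iff t q).mp ht t[j] (List.getElem_mem hjt)
      · rw [if_neg hql] at h
        exact absurd h (by simp)

theorem pvLastIdx?_mem (ls : List (List Int)) (q : Int) (j : Nat) (hj : j < ls.length)
    (h : q ∈ ls[j]) : ∃ k, pvLastIdx? q ls = some k ∧ j ≤ k := by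
  induction ls generalizing j with
  | nil => simp at hj
  | cons l t ih =>
    match j, hj with
    | 0, hj =>
      simp only [pvLastIdx?]
      cases ht : pvLastIdx? q t with
      | some k => exact ⟨k + 1, rfl, by omega⟩
      | none =>
        simp only [List.getElem_cons_zero] at h
        exact ⟨0, by rw [if_pos h], le_refl _⟩
    | j + 1, hj =>
      simp only [List.getElem_cons_succ] at h
      obtain ⟨k, hk, hjk⟩ := ih j (by simpa using hj) h
      simp only [pvLastIdx?, hk]
      exact ⟨k + 1, rfl, by omega⟩

theorem pvMem_flatten_drop (pfs : List (PySem.Set Int)) (m : Nat) (q : Int) :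
    q ∈ (pfs.drop m).flatten ↔ ∃ j, ∃ (hj : j < pfs.length), m ≤ j ∧ q ∈ pfs[j] := by
  rw [List.mem_flatten]
  constructor
  · rintro ⟨l, hl, hql⟩
    obtain ⟨jj, hjj, hget⟩ := List.mem_iff_getElem.mp hl
    rw [List.getElem_drop] at hget
    have hlen : m + jj < pfs.length := by
      have := hjj
      rw [List.length_drop] at this
      omega
    exact ⟨m + jj, hlen, by omega, by rw [hget]; exact hql⟩
  · rintro ⟨j, hj, hmj, hq⟩
    refine ⟨pfs[j], ?_, hq⟩
    rw [List.mem_iff_getElem]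
    refine ⟨j - m, by rw [List.length_drop]; omega, ?_⟩
    rw [List.getElem_drop]
    congr 1
    omega

theorem pvC_ne_iff (pfs : List (PySem.Set Int)) (i : Nat) (q : Int) (hi : i + 1 < pfs.length) :
    pvC pfs i q ≠ 0 ↔ ∃ j, ∃ (hj : j < pfs.length), i < j ∧ q ∈ pfs[j] := by
  unfold pvC
  have hsub : ∀ x, x ∈ (pfs.drop (pfs.length - 1)).flatten → x ∈ (pfs.drop (i + 1)).flatten := by
    intro x hx
    rw [pvMem_flatten_drop] at hx ⊢
    obtain ⟨j, hj, hmj, hq⟩ := hx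
    exact ⟨j, hj, by omega, hq⟩
  constructor
  · intro h
    have : (pfs.drop (i + 1)).flatten.count q ≠ 0 ∨ (pfs.drop (pfs.length - 1)).flatten.count q ≠ 0 := by
      by_contra hc
      push_neg at hc
      rw [hc.1, hc.2] at h
      simp at h
    have hmem : q ∈ (pfs.drop (i + 1)).flatten := by
      rcases this with h1 | h2
      · exact List.count_pos_iff.mp (Nat.pos_of_ne_zero h1)
      · exact hsub q (List.count_pos_iff.mp (Nat.pos_of_ne_zero h2))
    obtain ⟨j, hj, hmj, hq⟩ := (pvMem_flatten_drop pfs (i + 1) q).mp hmem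
    exact ⟨j, hj, by omega, hq⟩
  · rintro ⟨j, hj, hij, hq⟩
    have hmem : q ∈ (pfs.drop (i + 1)).flatten :=
      (pvMem_flatten_drop pfs (i + 1) q).mpr ⟨j, hj, by omega, hq⟩
    have h1 : 0 < (pfs.drop (i + 1)).flatten.count q := List.count_pos_iff.mpr hmem
    have h2 : (0 : Nat) ≤ (pfs.drop (pfs.length - 1)).flatten.count q := Nat.zero_le _
    omega

theorem pvC_step (pfs : List (PySem.Set Int)) (i : Nat) (q : Int) (hi : i + 1 < pfs.length)
    (hnd : pfs[i + 1].Nodup) :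
    pvC pfs i q = pvC pfs (i + 1) q + (if q ∈ pfs[i + 1] then 1 else 0) := by
  unfold pvC
  rw [List.drop_eq_getElem_cons hi, List.flatten_cons, List.count_append]
  have : pfs[i + 1].count q = if q ∈ pfs[i + 1] then 1 else 0 := by
    by_cases hq : q ∈ pfs[i + 1]
    · rw [if_pos hq, List.count_eq_one_of_mem hnd hq]
    · rw [if_neg hq, List.count_eq_zero.mpr hq]
  rw [this]
  by_cases hq : q ∈ pfs[i + 1] <;> simp [hq] <;> push_cast <;> ring

theorem pvIfMax (r v : Int) : (if r < v then v else r) = max r v := by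
  by_cases h : r < v <;> simp [max_def] <;> omega

theorem pvFoldMax_witness (l : List Int) (f : Int → Int) :
    ∀ a : Int, l.foldl (fun acc y => max acc (f y)) a = a ∨
      ∃ x ∈ l, l.foldl (fun acc y => max acc (f y)) a = f x := by
  induction l with
  | nil => intro a; left; rfl
  | cons x t ih =>
    intro a
    rw [List.foldl_cons]
    rcases ih (max a (f x)) with h | ⟨y, hy, hfy⟩
    · rw [h]
      rcases le_total (f x) a with hle | hle
      · left; omega
      · right; exact ⟨x, List.mem_cons_self, by omega⟩
    · right; exact ⟨y, List.mem_cons_of_mem _ hy, hfy⟩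

-- the joint forward sweep: A's loop and B's loop agree step by step
theorem pvFwd_eq (pfl : List (List Int)) (dd : Nat) :
    ∀ (i : Nat) (cur : PySem.Set Int) (suf : PySem.Dict Int Int) (reach : Int),
    pfl.length - 1 - i = dd →
    (∀ p, p ∈ cur ↔ ∃ j, ∃ (hj : j < pfl.length), j < i ∧ p ∈ pfl[j]) →
    (∀ q, suf.get? q = if pvC (pfl.map PySem.Set.ofList) i q = 0 then none
                       else some (pvC (pfl.map PySem.Set.ofList) i q)) →
    (∀ (p : Int) (j : Nat) (hj : j < pfl.length), j < i → p ∈ pfl[j] → pvLV pfl p ≤ reach) →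
    (reach = -1 ∨ ∃ (p : Int) (j : Nat) (hj : j < pfl.length), j < i ∧ p ∈ pfl[j] ∧ reach = pvLV pfl p) →
    pvFwdA (pfl.map PySem.Set.ofList) (PySem.List.pyRange (i : Int) ((pfl.length : Int) - 1) 1) cur suf
      = pvFwdB pfl (pvLastDict pfl) (PySem.List.pyRange (i : Int) ((pfl.length : Int) - 1) 1) reach := by
  induction dd with
  | zero =>
    intro i cur suf reach hlen _ _ _ _
    have hnil : PySem.List.pyRange (i : Int) ((pfl.length : Int) - 1) 1 = [] :=
      PySem.List.pyRange_one_eq_nil (by omega)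
    rw [hnil]
    rfl
  | succ dd ih =>
    intro i cur suf reach hlen hcur hsuf hreach₁ hreach₂
    have hiN : i < pfl.length := by clear hcur hsuf hreach₁ hreach₂; omega
    have hi1N : i + 1 < pfl.length := by clear hcur hsuf hreach₁ hreach₂; omega
    have hlen' : pfl.length - 1 - (i + 1) = dd := by clear hcur hsuf hreach₁ hreach₂; omega
    have hfsN : (pfl.map PySem.Set.ofList).length = pfl.length := List.length_map _
    have hcons : PySem.List.pyRange (i : Int) ((pfl.length : Int) - 1) 1
        = (i : Int) :: PySem.List.pyRange ((i : Int) + 1) ((pfl.length : Int) - 1) 1 :=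
      PySem.List.pyRange_one_cons (by omega)
    have hcast : ((i : Int) + 1) = ((i + 1 : Nat) : Int) := by push_cast; ring
    have hgi : PySem.List.pyGetD (pfl.map PySem.Set.ofList) (i : Int) []
        = PySem.Set.ofList pfl[i] := by
      rw [PySem.List.pyGetD_natCast, List.getD_eq_getElem _ _ (by omega), List.getElem_map]
    have hgi1 : PySem.List.pyGetD (pfl.map PySem.Set.ofList) ((i : Int) + 1) []
        = PySem.Set.ofList pfl[i + 1] := by
      rw [hcast, PySem.List.pyGetD_natCast, List.getD_eq_getElem _ _ (by omega), List.getElem_map]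
    have hgl : PySem.List.pyGetD pfl (i : Int) [] = pfl[i] := by
      rw [PySem.List.pyGetD_natCast, List.getD_eq_getElem _ _ hiN]
    -- facts about B's last dict and last occurrence indices
    have hLV : ∀ (p : Int) (j : Nat), j < pfl.length → p ∈ pfl[j]! →
        (pvLastDict pfl).getD p 0 = pvLV pfl p ∧ (j : Int) ≤ pvLV pfl p := by
      intro p j hj hp
      rw [List.getElem!_eq_getElem?_getD, List.getElem?_eq_getElem hj] at hp
      obtain ⟨k, hk, hjk⟩ := pvLastIdx?_mem pfl p j hj hp
      constructor
      · rw [PySem.Dict.getD_eq_get?_getD, pvLastDict_get?, hk]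
        simp [pvLV, hk]
      · simp only [pvLV, hk]
        omega
    have hLVle : ∀ (p : Int) (j₀ : Nat), j₀ < pfl.length → p ∈ pfl[j₀]! →
        (pvLV pfl p ≤ (i : Int) ↔ ∀ (j : Nat) (hj : j < pfl.length), i < j → p ∉ pfl[j]) := by
      intro p j₀ hj₀ hp
      rw [List.getElem!_eq_getElem?_getD, List.getElem?_eq_getElem hj₀] at hp
      obtain ⟨k, hk, hj₀k⟩ := pvLastIdx?_mem pfl p j₀ hj₀ hp
      obtain ⟨hkN, hkmem, hkmax⟩ := pvLastIdx?_some_spec pfl p k hk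
      simp only [pvLV, hk]
      constructor
      · intro hki j hj hij hmem
        obtain ⟨k', hk', hjk'⟩ := pvLastIdx?_mem pfl p j hj hmem
        rw [hk] at hk'
        have : k' = k := by injection hk'.symm
        omega
      · intro hall
        by_contra hgt
        have hik : i < k := by omega
        exact hall k hkN hik hkmem
    -- membership of keys in A's suffix counter
    have hcontains : ∀ q : Int, suf.contains q = true ↔
        ∃ (j : Nat) (hj : j < pfl.length), i < j ∧ q ∈ pfl[j] := by
      intro q
      rw [PySem.Dict.contains_eq_isSome_get?, hsuf q]
      have hiff := pvC_ne_iff (pfl.map PySem.Set.ofList) i q (by omega)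
      by_cases hz : pvC (pfl.map PySem.Set.ofList) i q = 0
      · simp only [hz, if_pos rfl, Option.isSome_none]
        constructor
        · intro h; exact absurd h (by simp)
        · rintro ⟨j, hj, hij, hq⟩
          exact absurd (hiff.mpr ⟨j, by omega, hij, by rw [List.getElem_map]; exact (PySem.Set.mem_ofList _ _).mpr hq⟩) (by simp [hz])
      · simp only [hz, if_neg hz, Option.isSome_some]
        constructor
        · intro _
          obtain ⟨j, hj, hij, hq⟩ := hiff.mp hz
          rw [List.getElem_map, PySem.Set.mem_ofList] at hq
          exact ⟨j, by omega, hij, hq⟩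
        · intro _; rfl
    -- B's inner max fold
    have hfold : pfl[i].foldl
          (fun r p => if r < (pvLastDict pfl).getD p 0 then (pvLastDict pfl).getD p 0 else r) reach
        = pfl[i].foldl (fun r p => max r (pvLV pfl p)) reach := by
      apply PySem.List.foldl_congr_mem
      intro acc x hx
      rw [pvIfMax, (hLV x i hiN (by rw [List.getElem!_eq_getElem?_getD, List.getElem?_eq_getElem hiN]; exact hx)).1]
    have hR1 := PySem.List.le_foldl_max_int pfl[i] (pvLV pfl) reach
    have hRw := pvFoldMax_witness pfl[i] (pvLV pfl) reach
    set R' := pfl[i].foldl (fun r p => max r (pvLV pfl p)) reach with hR'def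
    -- the two loop conditions agree
    have hiff : ((PySem.Set.union cur (PySem.Set.ofList pfl[i])).all (fun p => !(suf.contains p)) = true)
        ↔ R' ≤ (i : Int) := by
      rw [List.all_eq_true]
      constructor
      · intro hall
        have hok : ∀ (p : Int) (j : Nat), j < pfl.length → j ≤ i → p ∈ pfl[j]! → pvLV pfl p ≤ (i : Int) := by
          intro p j hj hji hp
          have hp' : p ∈ pfl[j] := by
            rw [List.getElem!_eq_getElem?_getD, List.getElem?_eq_getElem hj] at hp
            exact hp
          have hmemcur : p ∈ PySem.Set.union cur (PySem.Set.ofList pfl[i]) := by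
            rcases Nat.lt_or_ge j i with hlt | hge
            · exact (PySem.Set.mem_union _ _ _).mpr (Or.inl ((hcur p).mpr ⟨j, hj, hlt, hp'⟩))
            · have : j = i := by omega
              subst this
              exact (PySem.Set.mem_union _ _ _).mpr (Or.inr ((PySem.Set.mem_ofList _ _).mpr hp'))
          have hcf := hall p hmemcur
          rw [Bool.not_eq_eq_eq_not, Bool.not_true] at hcf
          have hnosuf : ∀ (j' : Nat) (hj' : j' < pfl.length), i < j' → p ∉ pfl[j'] := by
            intro j' hj' hij' hmem
            have := (hcontains p).mpr ⟨j', hj', hij', hmem⟩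
            rw [hcf] at this
            exact Bool.false_ne_true this
          exact (hLVle p j hj hp).mpr hnosuf
        rcases hRw with h | ⟨x, hx, hXx⟩
        · rcases hreach₂ with hr | ⟨p, j, hj, hji, hpj, hr⟩
          · rw [h, hr]; omega
          · rw [h, hr]
            exact hok p j hj (by omega) (by rw [List.getElem!_eq_getElem?_getD, List.getElem?_eq_getElem hj]; exact hpj)
        · rw [hXx]
          exact hok x i hiN (le_refl i) (by rw [List.getElem!_eq_getElem?_getD, List.getElem?_eq_getElem hiN]; exact hx)
      · intro hR p hp
        rw [Bool.not_eq_eq_eq_not, Bool.not_true]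
        by_contra hct
        have hct' : suf.contains p = true := by
          cases hcc : suf.contains p
          · exact absurd hcc hct
          · rfl
        obtain ⟨j', hj', hij', hmem'⟩ := (hcontains p).mp hct'
        rcases (PySem.Set.mem_union _ _ _).mp hp with hc | hd
        · obtain ⟨j, hj, hji, hpj⟩ := (hcur p).mp hc
          have h1 : pvLV pfl p ≤ reach := hreach₁ p j hj hji hpj
          have h2 : (j' : Int) ≤ pvLV pfl p :=
            (hLV p j' hj' (by rw [List.getElem!_eq_getElem?_getD, List.getElem?_eq_getElem hj']; exact hmem')).2
          have h3 : reach ≤ R' := hR1.1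
          omega
        · rw [PySem.Set.mem_ofList] at hd
          have h1 : pvLV pfl p ≤ R' := hR1.2 p hd
          have h2 : (j' : Int) ≤ pvLV pfl p :=
            (hLV p j' hj' (by rw [List.getElem!_eq_getElem?_getD, List.getElem?_eq_getElem hj']; exact hmem')).2
          omega
    -- one step of both loops
    rw [hcons]
    show (let cur' := PySem.Set.union cur (PySem.List.pyGetD (pfl.map PySem.Set.ofList) (i : Int) [])
          if cur'.all (fun p => !(suf.contains p)) then (i : Int)
          else
            let suf' := (PySem.List.pyGetD (pfl.map PySem.Set.ofList) ((i : Int) + 1) []).foldl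
              (fun d p =>
                let v := d.getD p 0 - 1
                let d' := d.insert p v
                if v = 0 then d'.erase p else d') suf
            pvFwdA (pfl.map PySem.Set.ofList) (PySem.List.pyRange ((i : Int) + 1) ((pfl.length : Int) - 1) 1) cur' suf')
        = (let reach' := (PySem.List.pyGetD pfl (i : Int) []).foldl
              (fun r p => if r < (pvLastDict pfl).getD p 0 then (pvLastDict pfl).getD p 0 else r) reach
           if reach' ≤ (i : Int) then (i : Int)
           else pvFwdB pfl (pvLastDict pfl) (PySem.List.pyRange ((i : Int) + 1) ((pfl.length : Int) - 1) 1) reach')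
    simp only [hgi, hgi1, hgl, hfold]
    by_cases hcond : R' ≤ (i : Int)
    · rw [if_pos (hiff.mpr hcond), if_pos hcond]
    · rw [if_neg (fun h => hcond (hiff.mp h)), if_neg hcond]
      rw [hcast]
      apply ih (i + 1) _ _ _ hlen'
      · -- cur invariant
        intro p
        rw [PySem.Set.mem_union, hcur p, PySem.Set.mem_ofList]
        constructor
        · rintro (⟨j, hj, hji, hpj⟩ | hpi)
          · exact ⟨j, hj, by omega, hpj⟩
          · exact ⟨i, hiN, by omega, hpi⟩
        · rintro ⟨j, hj, hji, hpj⟩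
          rcases Nat.lt_or_ge j i with hlt | hge
          · exact Or.inl ⟨j, hj, hlt, hpj⟩
          · have : j = i := by omega
            subst this
            exact Or.inr hpj
      · -- suffix counter invariant
        intro q
        rw [pvDecFold (PySem.Set.ofList pfl[i + 1]) (PySem.Set.nodup_ofList _) suf q]
        have hgd : suf.getD q 0 = (if pvC (pfl.map PySem.Set.ofList) i q = 0 then 0
            else pvC (pfl.map PySem.Set.ofList) i q) := by
          rw [PySem.Dict.getD_eq_get?_getD, hsuf q]
          by_cases hz : pvC (pfl.map PySem.Set.ofList) i q = 0 <;> simp [hz]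
        have hstep := pvC_step (pfl.map PySem.Set.ofList) i q (by omega)
          (by rw [List.getElem_map]; exact PySem.Set.nodup_ofList _)
        rw [List.getElem_map] at hstep
        by_cases hqm : q ∈ PySem.Set.ofList pfl[i + 1]
        · rw [if_pos hqm]
          have hne : pvC (pfl.map PySem.Set.ofList) i q ≠ 0 := by
            apply (pvC_ne_iff (pfl.map PySem.Set.ofList) i q (by omega)).mpr
            exact ⟨i + 1, by omega, by omega, by rw [List.getElem_map]; exact hqm⟩
          rw [hgd, if_neg hne]
          rw [if_pos hqm] at hstep
          have : pvC (pfl.map PySem.Set.ofList) i q - 1 = pvC (pfl.map PySem.Set.ofList) (i + 1) q := by omega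
          rw [this]
        · rw [if_neg hqm, hsuf q]
          rw [if_neg hqm, add_zero] at hstep
          rw [hstep]
      · -- reach dominates the prefix
        intro p j hj hji hpj
        rcases Nat.lt_or_ge j i with hlt | hge
        · exact le_trans (hreach₁ p j hj hlt hpj) hR1.1
        · have : j = i := by omega
          subst this
          exact hR1.2 p hpj
      · -- reach is witnessed
        rcases hRw with h | ⟨x, hx, hXx⟩
        · rcases hreach₂ with hr | ⟨p, j, hj, hji, hpj, hr⟩
          · exact Or.inl (by rw [h, hr])
          · exact Or.inr ⟨p, j, hj, by omega, hpj, by rw [h, hr]⟩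
        · exact Or.inr ⟨x, i, hiN, by omega, hx, hXx⟩

theorem pvCountL (pfs : List (PySem.Set Int)) (q : Int) :
    ((PySem.List.pyRange ((pfs.length : Int) - 1) 0 (-1)).flatMap
        (fun i => PySem.List.pyGetD pfs i [])).count q
      = ((pfs.drop 1).flatten).count q := by
  rw [PySem.List.pyRange_neg_one_eq_reverse]
  have hb : ((pfs.length : Int) - 1 + 1) = (pfs.length : Int) := by ring
  rw [hb]
  have hmap : (PySem.List.pyRange (0 + 1) (pfs.length : Int) 1).map
      (fun j => PySem.List.pyGetD pfs j []) = pfs.drop 1 := by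
    have h := PySem.List.map_pyGetD_pyRange (xs := pfs) (a := (0:Int) + 1) (d := ([] : PySem.Set Int)) (by norm_num)
    simpa [PySem.List.len_eq] using h
  rw [List.count_flatMap, List.map_reverse, List.sum_reverse, ← List.map_map, hmap,
    List.count_flatten]

theorem pvCountLast (pfs : List (PySem.Set Int)) (h1 : 1 ≤ pfs.length) (q : Int) :
    (pfs.drop (pfs.length - 1)).flatten.count q = (pfs[pfs.length - 1]'(by omega)).count q := by
  rw [List.drop_eq_getElem_cons (by omega)]
  have hlen : pfs.length - 1 + 1 = pfs.length := by omega
  rw [hlen, List.drop_length]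
  simp

theorem pvSufInit (pfs : List (PySem.Set Int)) (h2 : 2 ≤ pfs.length) (q : Int) :
    ((PySem.List.pyRange ((pfs.length : Int) - 1) 0 (-1)).foldl
        (fun d i => (PySem.List.pyGetD pfs i []).foldl (fun d p => d.modify p 0 (fun v => v + 1)) d)
        (PySem.Dict.counter (pfs[pfs.length - 1]'(by omega)))).get? q
      = if pvC pfs 0 q = 0 then none else some (pvC pfs 0 q) := by
  rw [← List.foldl_flatMap]
  apply pvGet?_eq_of
  · rw [PySem.Dict.getD_foldl_modify_add_one, PySem.Dict.getD_counter, pvCountL]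
    rw [pvC, ← pvCountLast pfs (by omega) q]
    simp only [Nat.zero_add]
    push_cast
    ring
  · rw [PySem.Dict.contains_iff_mem_keys, PySem.Dict.keys_foldl_modify, PySem.Dict.keys_counter,
      PySem.Set.mem_update, PySem.Set.mem_ofList]
    rw [pvC]
    simp only [Nat.zero_add]
    constructor
    · rintro (hmem | hmem)
      · have h := List.count_pos_iff.mpr hmem
        rw [← pvCountLast pfs (by omega) q] at h
        omega
      · have h := List.count_pos_iff.mpr hmem
        rw [pvCountL] at h
        omega
    · intro hne
      by_cases hm1 : q ∈ pfs[pfs.length - 1]'(by omega)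
      · exact Or.inl hm1
      · right
        apply List.count_pos_iff.mp
        rw [pvCountL]
        have hz2 : (pfs.drop (pfs.length - 1)).flatten.count q = 0 := by
          rw [pvCountLast pfs (by omega) q]
          exact List.count_eq_zero.mpr hm1
        omega

theorem pvSufInit' (pfs : List (PySem.Set Int)) (n : Nat) (hn : n = pfs.length) (h2 : 2 ≤ n) (q : Int) :
    ((PySem.List.pyRange ((n - 1 : Nat) : Int) 0 (-1)).foldl
        (fun d i => (PySem.List.pyGetD pfs i []).foldl (fun d p => d.modify p 0 (fun v => v + 1)) d)
        (PySem.Dict.counter (pfs[n - 1]'(by omega)))).get? q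
      = if pvC pfs 0 q = 0 then none else some (pvC pfs 0 q) := by
  subst hn
  have hcast : ((pfs.length - 1 : Nat) : Int) = (pfs.length : Int) - 1 := by omega
  rw [hcast]
  exact pvSufInit pfs h2 q

theorem pvFwd_eq' (pfl : List (List Int)) (n : Nat) (hn : n = pfl.length) (h2 : 2 ≤ n)
    (suf : PySem.Dict Int Int)
    (hsuf : ∀ q, suf.get? q = if pvC (pfl.map PySem.Set.ofList) 0 q = 0 then none
                 else some (pvC (pfl.map PySem.Set.ofList) 0 q)) :
    pvFwdA (pfl.map PySem.Set.ofList) (PySem.List.pyRange 0 ((n - 1 : Nat) : Int) 1) PySem.Set.empty suf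
      = pvFwdB pfl (pvLastDict pfl) (PySem.List.pyRange 0 ((n - 1 : Nat) : Int) 1) (-1) := by
  subst hn
  have hcast : ((pfl.length - 1 : Nat) : Int) = (pfl.length : Int) - 1 := by omega
  rw [hcast]
  exact pvFwd_eq pfl (pfl.length - 1) 0 PySem.Set.empty suf (-1) (by omega)
    (by
      intro p
      constructor
      · intro h
        exact absurd h (by simp [PySem.Set.empty])
      · rintro ⟨j, hj, hj0, _⟩
        omega)
    hsuf
    (by intro p j hj hj0 _; omega)
    (Or.inl rfl)

-- ===== VERDICT (by name: the statement is the Claim_ definition above) =====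
theorem findValidSplit_spec : Claim_equal_findValidSplit := by
  intro nums _hdom hpre
  unfold Spec_findValidSplit
  by_cases h1 : nums.length = 1
  · obtain ⟨x, rfl⟩ := List.length_eq_one_iff.mp h1
    have hA : findValidSplit [x] = -1 := by
      unfold findValidSplit
      norm_num [PySem.List.len_eq]
    have hB : findValidSplit_alt [x] = -1 := by
      unfold findValidSplit_alt
      norm_num [PySem.List.len_eq]
      rfl
    rw [hA, hB]
  · have h2 : 2 ≤ nums.length := by
      rcases nums with _ | ⟨a, t⟩
      · exact absurd rfl hpre.1
      · rcases t with _ | ⟨b, t⟩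
        · simp at h1
        · show 2 ≤ t.length + 1 + 1
          omega
    have hne1 : ¬ ((nums.length : Int) = 1) := by omega
    have hmm : nums.map (fun x => PySem.Set.ofList (pvPrimeFactors x))
        = (nums.map pvPrimeFactors).map PySem.Set.ofList := by
      rw [List.map_map]
      rfl
    have hlen : (nums.map pvPrimeFactors).length = nums.length := List.length_map _
    have hlens : ((nums.map pvPrimeFactors).map PySem.Set.ofList).length = nums.length := by
      rw [List.length_map, hlen]
    have hidx : ((nums.length : Int) - 1) = ((nums.length - 1 : Nat) : Int) := by omega
    have hB : findValidSplit_alt nums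
        = pvFwdB (nums.map pvPrimeFactors) (pvLastDict (nums.map pvPrimeFactors))
            (PySem.List.pyRange 0 ((nums.length : Int) - 1) 1) (-1) := by
      unfold findValidSplit_alt
      rw [PySem.List.len_eq]
    rw [hB]
    simp only [findValidSplit, PySem.List.len_eq, if_neg hne1, hmm, hidx, PySem.List.pyGet?_natCast]
    have hget : ((nums.map pvPrimeFactors).map PySem.Set.ofList)[nums.length - 1]?
        = some (((nums.map pvPrimeFactors).map PySem.Set.ofList)[nums.length - 1]'(by
            rw [List.length_map, List.length_map]; omega)) :=
      List.getElem?_eq_getElem _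
    rw [hget]
    exact pvFwd_eq' (nums.map pvPrimeFactors) nums.length hlen.symm h2 _
      (fun q => pvSufInit' ((nums.map pvPrimeFactors).map PySem.Set.ofList) nums.length hlens.symm h2 q)
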